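-- pv_equiv track=rewrite | github.com/hsh5206/Algorithm_python | 프로그래머스/문제/Lv2/Lv2 스킬트리.py | solution
-- ===== SOURCE A (Python) =====
-- def solution(skill, skill_trees):
--     answer = 0
--     for tree in skill_trees:
--         index = []
--         for x in skill:
--             i = tree.find(x)
--             if i != -1:
--                 index.append((i, x))
--         index.sort()
--         result = ''
--         for _, x in index:
--             result += x
--         if result and result[0] == skill[0] and result in skill:
--             answer += 1
--         elif not result:
--             answer += 1
--     return answer
-- ===== SOURCE B (Python) =====
-- def solution(skill, skill_trees):
--     skills = set(skill)
--     answer = 0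
--     for tree in skill_trees:
--         seen = []
--         for c in tree:
--             if c in skills and c not in seen:
--                 seen.append(c)
--         if skill.startswith(''.join(seen)):
--             answer += 1
--     return answer
-- ===== Notes on version B (the rewrite author's own statement) =====
-- stated objective: idiomatic
-- what changed: Replaces A's per-tree build-(index,char)-pairs / sort / concatenate / substring-membership test with a single left-to-right scan of the tree that collects first occurrences of skill characters and one startswith prefix check against skill.
-- outside the precondition, e.g. on solution('aab', ['ab']): A returns 1, B returns 0
import Mathlib
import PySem

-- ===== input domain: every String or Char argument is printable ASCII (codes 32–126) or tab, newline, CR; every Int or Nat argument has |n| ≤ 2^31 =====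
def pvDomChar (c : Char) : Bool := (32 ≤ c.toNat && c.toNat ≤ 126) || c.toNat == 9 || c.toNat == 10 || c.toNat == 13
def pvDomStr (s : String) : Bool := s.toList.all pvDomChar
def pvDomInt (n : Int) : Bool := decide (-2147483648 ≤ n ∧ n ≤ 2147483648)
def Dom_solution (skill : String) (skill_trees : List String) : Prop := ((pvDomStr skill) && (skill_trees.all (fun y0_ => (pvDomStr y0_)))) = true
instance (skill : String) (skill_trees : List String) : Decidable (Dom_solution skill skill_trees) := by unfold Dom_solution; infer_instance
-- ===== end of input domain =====

-- B replaces A's per-tree pair-list/sort/concatenate/substring test by one scan of the tree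
-- collecting first occurrences of skill characters plus a single startswith check (idiomatic).

-- ===== PORT A =====
-- body of A's per-tree loop iteration: updates the running answer for one tree
def solutionTree (skill : List Char) (tree : List Char) (answer : Int) : Int :=
  let index : List (Int × Char) :=
    skill.foldl (fun acc x =>
      let i := PySem.Chars.find tree [x]
      if i ≠ -1 then acc ++ [(i, x)] else acc) []
  let index := PySem.List.sorted2 index Prod.fst Prod.snd
  let result : List Char := index.foldl (fun r p => r ++ [p.2]) []
  -- result[0] == skill[0] as Option equality: whenever result ≠ [] the chars of result come from
  -- skill, so skill ≠ [] and both sides are `some _`, exactly Python's reachable comparison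
  if result ≠ [] ∧ PySem.List.pyGet? result 0 = PySem.List.pyGet? skill 0 ∧ PySem.Chars.isIn result skill then answer + 1
  else if result = [] then answer + 1
  else answer

def solution (skill : String) (skill_trees : List String) : Int :=
  skill_trees.foldl (fun answer tree => solutionTree skill.toList tree.toList answer) 0

-- ===== PORT B =====
-- body of B's per-tree loop iteration
def solutionAltTree (skill : List Char) (skills : PySem.Set Char) (tree : List Char) (answer : Int) : Int :=
  let seen : List Char :=
    tree.foldl (fun seen c => if c ∈ skills ∧ c ∉ seen then seen ++ [c] else seen) []
  if PySem.Chars.startswith skill seen then answer + 1 else answer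

def solution_alt (skill : String) (skill_trees : List String) : Int :=
  let skills : PySem.Set Char := PySem.Set.ofList skill.toList
  skill_trees.foldl (fun answer tree => solutionAltTree skill.toList skills tree.toList answer) 0

-- ===== PRECONDITION & SPEC =====
-- Pre_ excludes skill strings with a repeated character: there A's substring test on the
-- duplicate-expanded result string and B's first-occurrence scan are two equally defensible
-- readings of an input the problem (distinct skills in a learning order) never specifies.
def Pre_solution (skill : String) (skill_trees : List String) : Prop := skill.toList.Nodup
instance (skill : String) (skill_trees : List String) : Decidable (Pre_solution skill skill_trees) := by unfold Pre_solution; infer_instance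

def pvWitness_solution : String × List String := ("CBD", ["BACDE", "CBADF", "AECB", "BDA"])

def Spec_solution (skill : String) (skill_trees : List String) (out : Int) : Prop := out = solution_alt skill skill_trees
instance (skill : String) (skill_trees : List String) (out : Int) : Decidable (Spec_solution skill skill_trees out) := by unfold Spec_solution; infer_instance

-- ===== CLAIM (what is proved, stated in full; the proofs are below) =====
def Claim_equal_solution : Prop := ∀ (skill : String) (skill_trees : List String), Dom_solution skill skill_trees → Pre_solution skill skill_trees → Spec_solution skill skill_trees (solution skill skill_trees)

-- ===== LEMMAS AND PROOFS =====

-- `[c]` is a prefix exactly when the head is c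
theorem pv_singleton_prefix_iff (c : Char) (l : List Char) : [c] <+: l ↔ l[0]? = some c := by
  cases l with
  | nil => simp
  | cons a t =>
    constructor
    · rintro ⟨s, hs⟩
      simp only [List.cons_append, List.nil_append, List.cons.injEq] at hs
      simp [hs.1]
    · intro h
      simp only [List.getElem?_cons_zero, Option.some.injEq] at h
      exact ⟨t, by simp [h]⟩

-- `[c]` is an infix exactly when c is a member
theorem pv_singleton_infix_iff (c : Char) (l : List Char) : [c] <:+: l ↔ c ∈ l := by
  constructor
  · rintro ⟨s, t, rfl⟩; simp
  · intro h
    obtain ⟨s, t, rfl⟩ := List.append_of_mem h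
    exact ⟨s, t, by simp⟩

theorem pv_find_char_nonneg {T : List Char} {c : Char} (h : c ∈ T) :
    0 ≤ PySem.Chars.find T [c] := by
  rw [PySem.Chars.find_nonneg_iff, pv_singleton_infix_iff]; exact h

-- find points at an occurrence of c
theorem pv_find_char_get {T : List Char} {c : Char} (h : c ∈ T) :
    T[(PySem.Chars.find T [c]).toNat]? = some c := by
  obtain ⟨hpre, -⟩ := PySem.Chars.find_spec (pv_find_char_nonneg h)
  rw [pv_singleton_prefix_iff] at hpre
  rwa [List.getElem?_drop, Nat.add_zero] at hpre

-- find is at most any occurrence index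
theorem pv_find_char_le {T : List Char} {c : Char} {i : Nat} (h : T[i]? = some c) :
    PySem.Chars.find T [c] ≤ (i : Int) := by
  have hmem : c ∈ T := List.mem_of_getElem? h
  have h0 := pv_find_char_nonneg hmem
  obtain ⟨-, hmin⟩ := PySem.Chars.find_spec h0
  by_contra hlt
  push_neg at hlt
  have hi : i < (PySem.Chars.find T [c]).toNat := by omega
  exact hmin i hi (by rw [pv_singleton_prefix_iff, List.getElem?_drop, Nat.add_zero]; exact h)

-- the first occurrence of c, exactly
theorem pv_find_char_eq {U V : List Char} {c : Char} (hU : c ∉ U) :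
    PySem.Chars.find (U ++ c :: V) [c] = (U.length : Int) := by
  have hget : (U ++ c :: V)[U.length]? = some c := by
    rw [List.getElem?_append_right (le_refl _)]
    simp
  have hle := pv_find_char_le hget
  have hmem : c ∈ U ++ c :: V := by simp
  have h0 := pv_find_char_nonneg hmem
  have hk := pv_find_char_get hmem
  rcases lt_trichotomy (PySem.Chars.find (U ++ c :: V) [c]).toNat U.length with h | h | h
  · exfalso
    rw [List.getElem?_append_left h] at hk
    exact hU (List.mem_of_getElem? hk)
  · omega
  · omega

-- ===== B's fold: membership, nodup, first-occurrence order =====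

theorem pv_bfold_mem (skills : PySem.Set Char) :
    ∀ (V acc : List Char) (a : Char),
      a ∈ V.foldl (fun seen c => if c ∈ skills ∧ c ∉ seen then seen ++ [c] else seen) acc ↔
        a ∈ acc ∨ (a ∈ skills ∧ a ∈ V) := by
  intro V
  induction V with
  | nil => simp
  | cons c V ih =>
    intro acc a
    simp only [List.foldl_cons]
    by_cases hc : c ∈ skills ∧ c ∉ acc
    · rw [if_pos hc, ih]
      simp only [List.mem_append, List.mem_cons, List.not_mem_nil, or_false]
      constructor
      · rintro ((h | rfl) | h)
        · exact Or.inl h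
        · exact Or.inr ⟨hc.1, Or.inl rfl⟩
        · exact Or.inr ⟨h.1, Or.inr h.2⟩
      · rintro (h | ⟨hs, rfl | hv⟩)
        · exact Or.inl (Or.inl h)
        · exact Or.inl (Or.inr rfl)
        · exact Or.inr ⟨hs, hv⟩
    · rw [if_neg hc, ih]
      push_neg at hc
      constructor
      · rintro (h | h)
        · exact Or.inl h
        · exact Or.inr ⟨h.1, List.mem_cons_of_mem _ h.2⟩
      · rintro (h | ⟨hs, hv⟩)
        · exact Or.inl h
        · rcases List.mem_cons.1 hv with rfl | hv
          · exact Or.inl (hc hs)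
          · exact Or.inr ⟨hs, hv⟩

theorem pv_bfold_nodup (skills : PySem.Set Char) :
    ∀ (V acc : List Char), acc.Nodup →
      (V.foldl (fun seen c => if c ∈ skills ∧ c ∉ seen then seen ++ [c] else seen) acc).Nodup := by
  intro V
  induction V with
  | nil => intro acc h; simpa using h
  | cons c V ih =>
    intro acc hacc
    simp only [List.foldl_cons]
    by_cases hc : c ∈ skills ∧ c ∉ acc
    · rw [if_pos hc]
      refine ih _ (List.nodup_append.2 ⟨hacc, List.nodup_singleton _, ?_⟩)
      intro a ha b hb
      rw [List.mem_singleton] at hb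
      subst hb
      exact fun h => hc.2 (h ▸ ha)
    · rw [if_neg hc]; exact ih _ hacc

-- elements enter B's list in order of their first occurrence in the tree
theorem pv_bfold_pairwise (skills : PySem.Set Char) (T : List Char) :
    ∀ (V U acc : List Char), U ++ V = T →
      (∀ a ∈ acc, a ∈ U) →
      (∀ b, b ∈ skills → b ∈ U → b ∈ acc) →
      acc.Pairwise (fun a b => PySem.Chars.find T [a] < PySem.Chars.find T [b]) →
      (V.foldl (fun seen c => if c ∈ skills ∧ c ∉ seen then seen ++ [c] else seen) acc).Pairwise
        (fun a b => PySem.Chars.find T [a] < PySem.Chars.find T [b]) := by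
  intro V
  induction V with
  | nil => intro U acc _ _ _ h; simpa using h
  | cons c V ih =>
    intro U acc hT hsub hclosed hpw
    simp only [List.foldl_cons]
    by_cases hc : c ∈ skills ∧ c ∉ acc
    · rw [if_pos hc]
      have hcU : c ∉ U := fun hU => hc.2 (hclosed c hc.1 hU)
      have hfc : PySem.Chars.find T [c] = (U.length : Int) := by
        rw [← hT]; exact pv_find_char_eq hcU
      refine ih (U ++ [c]) (acc ++ [c]) (by simp [hT]) ?_ ?_ ?_
      · intro a ha
        rcases List.mem_append.1 ha with ha | ha
        · exact List.mem_append.2 (Or.inl (hsub a ha))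
        · exact List.mem_append.2 (Or.inr ha)
      · intro b hb hbU
        rcases List.mem_append.1 hbU with hbU | hbU
        · exact List.mem_append.2 (Or.inl (hclosed b hb hbU))
        · exact List.mem_append.2 (Or.inr hbU)
      · rw [List.pairwise_append]
        refine ⟨hpw, List.pairwise_singleton _ _, ?_⟩
        intro a ha b hb
        rcases List.mem_singleton.1 hb with rfl
        have haU : a ∈ U := hsub a ha
        obtain ⟨i, hi, hgi⟩ := List.getElem_of_mem haU
        have hgT : T[i]? = some a := by
          rw [← hT, List.getElem?_append_left hi, List.getElem?_eq_getElem hi, hgi]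
        have := pv_find_char_le hgT
        rw [hfc]
        omega
    · rw [if_neg hc]
      push_neg at hc
      refine ih (U ++ [c]) acc (by simp [hT]) ?_ ?_ hpw
      · intro a ha; exact List.mem_append.2 (Or.inl (hsub a ha))
      · intro b hb hbU
        rcases List.mem_append.1 hbU with hbU | hbU
        · exact hclosed b hb hbU
        · rcases List.mem_singleton.1 hbU with rfl
          exact hc hb
-- ===== A's folds =====

theorem pv_afold_eq (T : List Char) (S : List Char) (acc : List (Int × Char)) :
    S.foldl (fun acc x =>
        let i := PySem.Chars.find T [x]
        if i ≠ -1 then acc ++ [(i, x)] else acc) acc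
      = acc ++ (S.filter (fun x => decide (x ∈ T))).map (fun x => (PySem.Chars.find T [x], x)) := by
  induction S generalizing acc with
  | nil => simp
  | cons x S ih =>
    rw [List.foldl_cons, List.filter_cons]
    by_cases hx : x ∈ T
    · have hne : PySem.Chars.find T [x] ≠ -1 := by
        rw [Ne, PySem.Chars.find_eq_neg_one_iff, pv_singleton_infix_iff]
        simpa using hx
      rw [show (let i := PySem.Chars.find T [x]
            if i ≠ -1 then acc ++ [(i, x)] else acc)
          = acc ++ [(PySem.Chars.find T [x], x)] from by simp [hne]]
      rw [ih, List.append_assoc]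
      simp [hx]
    · have hne : PySem.Chars.find T [x] = -1 := by
        rw [PySem.Chars.find_eq_neg_one_iff, pv_singleton_infix_iff]
        simpa using hx
      rw [show (let i := PySem.Chars.find T [x]
            if i ≠ -1 then acc ++ [(i, x)] else acc)
          = acc from by simp [hne]]
      rw [ih]
      simp [hx]

theorem pv_insertBy_congr {α : Type} (f g : α → α → Bool) (x : α) (ys : List α)
    (h : ∀ y ∈ ys, f x y = g x y) : PySem.List.insertBy f x ys = PySem.List.insertBy g x ys := by
  induction ys with
  | nil => rfl
  | cons y ys ih =>
    simp only [PySem.List.insertBy]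
    rw [h y (List.mem_cons_self)]
    by_cases hg : g x y = true
    · simp [hg]
    · simp only [Bool.not_eq_true] at hg
      simp [hg, ih (fun z hz => h z (List.mem_cons_of_mem _ hz))]

theorem pv_foldl_insertBy_congr {α : Type} (q : α → Prop) (f g : α → α → Bool)
    (hfg : ∀ a b, q a → q b → f a b = g a b) :
    ∀ (V acc : List α), (∀ x ∈ V, q x) → (∀ x ∈ acc, q x) →
      V.foldl (fun acc x => PySem.List.insertBy f x acc) acc
        = V.foldl (fun acc x => PySem.List.insertBy g x acc) acc := by
  intro V
  induction V with
  | nil => intro acc _ _; rfl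
  | cons c V ih =>
    intro acc hV hacc
    simp only [List.foldl_cons]
    have hcq : q c := hV c (List.mem_cons_self)
    rw [pv_insertBy_congr f g c acc (fun y hy => hfg c y hcq (hacc y hy))]
    refine ih _ (fun x hx => hV x (List.mem_cons_of_mem _ hx)) ?_
    intro x hx
    rcases (PySem.List.mem_insertBy _ _ _ _).1 hx with rfl | hx
    · exact hcq
    · exact hacc x hx

-- sorting the (first-index, char) pairs lexicographically = sorting by the index alone,
-- because on A's pair list the first component determines the second
theorem pv_sorted2_eq_sorted_fst (xs : List (Int × Char))
    (hinj : ∀ u ∈ xs, ∀ v ∈ xs, u.1 = v.1 → u.2 = v.2) :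
    PySem.List.sorted2 xs Prod.fst Prod.snd = PySem.List.sorted xs Prod.fst := by
  show xs.foldl (fun acc x => PySem.List.insertBy _ x acc) []
      = xs.foldl (fun acc x => PySem.List.insertBy _ x acc) []
  refine pv_foldl_insertBy_congr (fun u => u ∈ xs) _ _ ?_ xs [] (fun x hx => hx) (by simp)
  intro a b ha hb
  rcases lt_trichotomy a.1 b.1 with h | h | h
  · simp [h, not_lt_of_gt h]
  · have h2 : ¬ a.2 < b.2 := by rw [hinj a ha b hb h]; exact lt_irrefl _
    simp [h, h2]
  · simp [not_lt_of_gt h, h]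

-- ===== putting a tree's computation together =====

theorem pv_result_eq_seen (S T : List Char) (hS : S.Nodup) :
    (PySem.List.sorted2
        (S.foldl (fun acc x =>
          let i := PySem.Chars.find T [x]
          if i ≠ -1 then acc ++ [(i, x)] else acc) [])
        Prod.fst Prod.snd).foldl (fun r p => r ++ [p.2]) []
      = T.foldl (fun seen c => if c ∈ PySem.Set.ofList S ∧ c ∉ seen then seen ++ [c] else seen) [] := by
  set seen := T.foldl (fun seen c => if c ∈ PySem.Set.ofList S ∧ c ∉ seen then seen ++ [c] else seen) [] with hseen
  set index := S.foldl (fun acc x =>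
          let i := PySem.Chars.find T [x]
          if i ≠ -1 then acc ++ [(i, x)] else acc) [] with hindexdef
  have hindex : index = (S.filter (fun x => decide (x ∈ T))).map (fun x => (PySem.Chars.find T [x], x)) := by
    rw [hindexdef, pv_afold_eq]; simp
  -- membership / nodup facts about seen
  have hmem : ∀ a, a ∈ seen ↔ a ∈ S ∧ a ∈ T := by
    intro a
    rw [hseen, pv_bfold_mem]
    simp [PySem.Set.mem_ofList]
  have hnd : seen.Nodup := pv_bfold_nodup _ T [] List.nodup_nil
  -- seen, mapped to pairs, is a strictly-fst-increasing rearrangement of index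
  have hperm : (seen.map (fun c => (PySem.Chars.find T [c], c))).Perm index := by
    rw [hindex]
    refine List.Perm.map _ ?_
    rw [List.perm_ext_iff_of_nodup hnd (List.Nodup.filter _ hS)]
    intro a
    rw [hmem]
    simp
  have hpw : (seen.map (fun c => (PySem.Chars.find T [c], c))).Pairwise
      (fun u v : Int × Char => u.1 < v.1) := by
    rw [List.pairwise_map]
    exact pv_bfold_pairwise _ T T [] [] rfl (by simp) (by simp) List.Pairwise.nil
  have hinj : ∀ u ∈ index, ∀ v ∈ index, u.1 = v.1 → u.2 = v.2 := by
    rw [hindex]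
    intro u hu v hv huv
    simp only [List.mem_map, List.mem_filter, decide_eq_true_eq] at hu hv
    obtain ⟨x, ⟨-, hxT⟩, rfl⟩ := hu
    obtain ⟨y, ⟨-, hyT⟩, rfl⟩ := hv
    simp only at huv ⊢
    have hx := pv_find_char_get hxT
    have hy := pv_find_char_get hyT
    rw [huv] at hx
    rw [hx] at hy
    exact Option.some.inj hy
  rw [pv_sorted2_eq_sorted_fst index hinj,
    PySem.List.sorted_eq_of_perm_of_pairwise_lt index (seen.map (fun c => (PySem.Chars.find T [c], c))) Prod.fst hperm hpw,
    PySem.List.foldl_append_singleton_eq_map]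
  simp [Function.comp_def]

-- a nonempty result that starts at skill's head and is an infix of a duplicate-free skill
-- is exactly a prefix of skill
theorem pv_prefix_of_infix_head {S : List Char} (hS : S.Nodup) {a : Char} {r : List Char}
    (hinf : (a :: r) <:+: S) (hhead : S[0]? = some a) : (a :: r) <+: S := by
  obtain ⟨U, V, hUV⟩ := hinf
  cases U with
  | nil => exact ⟨V, by simpa using hUV⟩
  | cons u U' =>
    exfalso
    rw [← hUV] at hhead hS
    simp only [List.cons_append, List.getElem?_cons_zero, Option.some.injEq] at hhead
    subst hhead
    simp only [List.cons_append, List.append_assoc, List.nodup_cons] at hS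
    exact hS.1 (by simp)

theorem pv_cond_iff {S : List Char} (hS : S.Nodup) (r : List Char) :
    ((r ≠ [] ∧ PySem.List.pyGet? r 0 = PySem.List.pyGet? S 0 ∧ PySem.Chars.isIn r S = true) ∨ r = [])
      ↔ PySem.Chars.startswith S r = true := by
  cases r with
  | nil =>
    simp [PySem.Chars.startswith]
  | cons a r =>
    rw [PySem.Chars.startswith_iff]
    constructor
    · rintro (⟨-, hget, hin⟩ | h)
      · have hinf := (PySem.Chars.isIn_iff_infix _ _).1 hin
        have hhead : S[0]? = some a := by
          have h1 : PySem.List.pyGet? (a :: r) (0 : Int) = some a := by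
            simp [PySem.List.pyGet?, PySem.List.pyIdx?]
          rw [h1] at hget
          cases S with
          | nil => simp [PySem.List.pyGet?, PySem.List.pyIdx?] at hget
          | cons b S' =>
            simp only [PySem.List.pyGet?, PySem.List.pyIdx?] at hget
            simp_all
        exact pv_prefix_of_infix_head hS hinf hhead
      · exact absurd h (by simp)
    · intro hpre
      left
      obtain ⟨V, hV⟩ := hpre
      refine ⟨by simp, ?_, ?_⟩
      · rw [← hV]
        have h0 : (0 : Int) ≤ (r.length : Int) + (V.length : Int) := by omega
        simp [PySem.List.pyGet?, PySem.List.pyIdx?, h0]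
      · rw [PySem.Chars.isIn_iff_infix]
        exact List.IsPrefix.isInfix ⟨V, hV⟩

theorem pv_tree_eq (S T : List Char) (hS : S.Nodup) (answer : Int) :
    solutionTree S T answer = solutionAltTree S (PySem.Set.ofList S) T answer := by
  unfold solutionTree solutionAltTree
  simp only []
  rw [pv_result_eq_seen S T hS]
  set seen := T.foldl (fun seen c => if c ∈ PySem.Set.ofList S ∧ c ∉ seen then seen ++ [c] else seen) [] with hseen
  by_cases hsw : PySem.Chars.startswith S seen = true
  · rcases (pv_cond_iff hS seen).2 hsw with ⟨h1, h2, h3⟩ | h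
    · rw [if_pos ⟨h1, h2, h3⟩, hsw, if_pos rfl]
    · rw [hsw, if_pos rfl]
      by_cases hc : seen ≠ [] ∧ PySem.List.pyGet? seen 0 = PySem.List.pyGet? S 0 ∧ PySem.Chars.isIn seen S = true
      · rw [if_pos hc]
      · rw [if_neg hc, if_pos h]
  · have hnc : ¬ (seen ≠ [] ∧ PySem.List.pyGet? seen 0 = PySem.List.pyGet? S 0 ∧ PySem.Chars.isIn seen S = true) := by
      intro hc
      exact hsw ((pv_cond_iff hS seen).1 (Or.inl hc))
    have hne : ¬ seen = [] := by
      intro h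
      exact hsw ((pv_cond_iff hS seen).1 (Or.inr h))
    rw [if_neg hnc, if_neg hne, Bool.not_eq_true] at *
    rw [hsw]
    simp

-- ===== VERDICT (by name: the statement is the Claim_ definition above) =====
theorem solution_spec : Claim_equal_solution := by
  intro skill skill_trees _ hPre
  unfold Spec_solution solution solution_alt
  simp only []
  exact List.foldl_ext _ _ 0 (fun (a : Int) (t : String) (_ : t ∈ skill_trees) =>
    pv_tree_eq skill.toList t.toList hPre a)
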